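-- pv_equiv track=rewrite | github.com/BenWoodland/slicermodifications | ProcessorWriterJupyter.py | node_connectivity_finder
-- ===== SOURCE A (Python) =====
-- def node_connectivity_finder(dictionary):
--     new_dictionary = {}
--
--     for key1, values1 in dictionary.items():
--         shared_keys = []
--
--         for key2, values2 in dictionary.items():
--             if key1 == key2:
--                 continue
--
--             # Count how many values from values1 are also in values2
--             shared_count = sum(1 for v in values1 if v in values2)
--
--             # Repeat key2 shared_count times
--             shared_keys.extend([key2] * shared_count)
--
--         new_dictionary[key1] = shared_keys
--
--
--     return new_dictionary
-- ===== SOURCE B (Python) =====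
-- def node_connectivity_finder(dictionary):
--     # Inverted index: value -> list of keys whose value-list contains it (each key once).
--     index = {}
--     for k, vs in dictionary.items():
--         for v in set(vs):
--             index.setdefault(v, []).append(k)
--
--     new_dictionary = {}
--     for key1, values1 in dictionary.items():
--         counts = {}
--         for v in values1:
--             for k2 in index.get(v, []):
--                 if k2 != key1:
--                     counts[k2] = counts.get(k2, 0) + 1
--         new_dictionary[key1] = [k2 for k2 in dictionary
--                                 if k2 != key1
--                                 for _ in range(counts.get(k2, 0))]
--     return new_dictionary
-- ===== Notes on version B (the rewrite author's own statement) =====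
-- stated objective: faster
-- what changed: Replaced A's nested all-pairs loop (which rescans values2 for every element of values1 for every key pair) with a single inverted index value->keys built once, a per-key tally dictionary fed from that index, and a rebuild of each entry in original key order.
import Mathlib
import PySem

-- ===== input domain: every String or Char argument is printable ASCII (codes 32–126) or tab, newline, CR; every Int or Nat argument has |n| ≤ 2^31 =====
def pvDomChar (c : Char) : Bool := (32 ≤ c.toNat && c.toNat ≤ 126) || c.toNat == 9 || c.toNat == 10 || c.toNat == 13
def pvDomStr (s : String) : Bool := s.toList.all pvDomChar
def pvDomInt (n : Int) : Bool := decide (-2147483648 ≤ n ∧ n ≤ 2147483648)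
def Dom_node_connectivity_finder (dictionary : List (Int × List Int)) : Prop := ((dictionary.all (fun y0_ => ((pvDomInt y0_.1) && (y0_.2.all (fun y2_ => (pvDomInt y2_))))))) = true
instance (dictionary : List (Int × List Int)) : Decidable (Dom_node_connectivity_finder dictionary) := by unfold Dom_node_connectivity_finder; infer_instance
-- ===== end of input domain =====

-- B replaces A's pairwise membership scans with an inverted index (value -> keys) and a
-- per-key tally dictionary, rebuilding each entry in original key order; objective: faster.


-- ===== PORT A =====
-- The Python parameter is a dict: the association-list argument reaches it as dict(pairs)
-- (insertion order, later duplicate keys overwrite in place) — PySem.Dict.ofList is exact there.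
def node_connectivity_finder (dictionary : List (Int × List Int)) : List (Int × List Int) :=
  let d : PySem.Dict Int (List Int) := PySem.Dict.ofList dictionary
  let new_dictionary : PySem.Dict Int (List Int) :=
    d.items.foldl (fun new_dictionary p =>
      let key1 := p.1
      let values1 := p.2
      let shared_keys : List Int :=
        d.items.foldl (fun shared_keys q =>
          if q.1 == key1 then shared_keys
          else
            -- shared_count = sum(1 for v in values1 if v in values2)
            let shared_count : Int :=
              values1.foldl (fun acc v => if v ∈ q.2 then acc + 1 else acc) 0
            shared_keys ++ PySem.List.pyRepeat [q.1] shared_count) []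
      new_dictionary.insert key1 shared_keys) PySem.Dict.empty
  new_dictionary.items

-- ===== PORT B =====
def node_connectivity_finder_alt (dictionary : List (Int × List Int)) : List (Int × List Int) :=
  let d : PySem.Dict Int (List Int) := PySem.Dict.ofList dictionary
  -- index = {}; for k, vs in d.items(): for v in set(vs): index.setdefault(v, []).append(k)
  let index : PySem.Dict Int (List Int) :=
    d.items.foldl (fun index p =>
      (PySem.Set.ofList p.2).foldl (fun index v => index.modify v [] (· ++ [p.1])) index)
      PySem.Dict.empty
  let new_dictionary : PySem.Dict Int (List Int) :=
    d.items.foldl (fun new_dictionary p =>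
      let key1 := p.1
      let counts : PySem.Dict Int Int :=
        p.2.foldl (fun counts v =>
          (index.getD v []).foldl (fun counts k2 =>
            if k2 == key1 then counts else counts.modify k2 0 (· + 1)) counts)
          PySem.Dict.empty
      new_dictionary.insert key1
        (d.keys.foldl (fun out k2 =>
          if k2 == key1 then out
          else out ++ PySem.List.pyRepeat [k2] (counts.getD k2 0)) []))
      PySem.Dict.empty
  new_dictionary.items

-- ===== PRECONDITION & SPEC =====
def Spec_node_connectivity_finder (dictionary : List (Int × List Int)) (out : List (Int × List Int)) : Prop := out = node_connectivity_finder_alt dictionary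
instance (dictionary : List (Int × List Int)) (out : List (Int × List Int)) : Decidable (Spec_node_connectivity_finder dictionary out) := by unfold Spec_node_connectivity_finder; infer_instance

-- ===== CLAIM (what is proved, stated in full; the proofs are below) =====
def Claim_equal_node_connectivity_finder : Prop := ∀ (dictionary : List (Int × List Int)), Dom_node_connectivity_finder dictionary → Spec_node_connectivity_finder dictionary (node_connectivity_finder dictionary)

-- ===== LEMMAS AND PROOFS =====

-- Inner index loop over one (deduplicated) value list: appends the key under v exactly once if present.
theorem pv_idx_step (s : List Int) (hs : s.Nodup) (ix : PySem.Dict Int (List Int)) (k v : Int) :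
    (s.foldl (fun ix v' => ix.modify v' [] (· ++ [k])) ix).getD v []
      = ix.getD v [] ++ (if v ∈ s then [k] else []) := by
  induction s generalizing ix with
  | nil => simp
  | cons a t ih =>
    rcases List.nodup_cons.mp hs with ⟨ha, ht⟩
    simp only [List.foldl_cons]
    rw [ih ht, PySem.Dict.getD_modify]
    by_cases hva : v = a
    · subst hva
      simp [ha]
    · simp [hva, List.mem_cons]

-- The finished inverted index at v holds the keys whose value list contains v, in entry order.
theorem pv_idx_all (l : List (Int × List Int)) (ix0 : PySem.Dict Int (List Int)) (v : Int) :
    (l.foldl (fun ix p => (PySem.Set.ofList p.2).foldl (fun ix v' => ix.modify v' [] (· ++ [p.1])) ix) ix0).getD v []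
      = ix0.getD v [] ++ (l.filter (fun q => decide (v ∈ q.2))).map Prod.fst := by
  induction l generalizing ix0 with
  | nil => simp
  | cons p t ih =>
    simp only [List.foldl_cons]
    rw [ih, pv_idx_step _ (PySem.Set.nodup_ofList p.2)]
    by_cases hv : v ∈ p.2
    · simp [hv, PySem.Set.mem_ofList]
    · simp [hv, PySem.Set.mem_ofList]

-- One tally pass over an index bucket: every occurrence of k (k ≠ key1) adds one.
theorem pv_cnt_inner (ys : List Int) (key1 k : Int) (hk : k ≠ key1) (c : PySem.Dict Int Int) :
    (ys.foldl (fun c k2 => if k2 == key1 then c else c.modify k2 0 (· + 1)) c).getD k 0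
      = c.getD k 0 + (ys.count k : Int) := by
  rw [PySem.List.foldl_congr_mem ys _
      (fun c k2 => if ¬ (k2 = key1) then c.modify k2 0 (· + 1) else c) c
      (by intro acc x _; by_cases h : x = key1 <;> simp [h])]
  rw [PySem.List.foldl_ite_eq_foldl_filter, PySem.Dict.getD_foldl_modify_add_one,
      List.count_filter (by simp [hk])]

-- The whole counts dictionary: counts[k] sums the occurrences of k over the buckets of values1.
theorem pv_cnt_all (vals : List Int) (idx : Int → List Int) (key1 k : Int) (hk : k ≠ key1)
    (c0 : PySem.Dict Int Int) :
    (vals.foldl (fun c v => (idx v).foldl (fun c k2 => if k2 == key1 then c else c.modify k2 0 (· + 1)) c) c0).getD k 0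
      = c0.getD k 0 + (vals.map (fun v => ((idx v).count k : Int))).sum := by
  induction vals generalizing c0 with
  | nil => simp
  | cons v t ih =>
    simp only [List.foldl_cons, List.map_cons, List.sum_cons]
    rw [ih, pv_cnt_inner _ _ _ hk]
    ring

-- With distinct keys, a bucket counts k once exactly when v lies in k's value list.
theorem pv_count_in_index (l : List (Int × List Int)) (hnd : (l.map Prod.fst).Nodup)
    (k : Int) (vs : List Int) (hmem : (k, vs) ∈ l) (v : Int) :
    ((l.filter (fun q => decide (v ∈ q.2))).map Prod.fst).count k = if v ∈ vs then 1 else 0 := by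
  induction l with
  | nil => simp at hmem
  | cons q t ih =>
    simp only [List.map_cons, List.nodup_cons] at hnd
    obtain ⟨hq, ht⟩ := hnd
    rcases List.mem_cons.mp hmem with hhead | htail
    · have hq1 : q.1 = k := by rw [← hhead]
      have hknot : k ∉ (t.filter (fun r => decide (v ∈ r.2))).map Prod.fst := by
        intro hkmem
        rcases List.mem_map.mp hkmem with ⟨r, hr, hr1⟩
        exact hq (hq1 ▸ hr1 ▸ (List.mem_map.mpr ⟨r, List.mem_of_mem_filter hr, rfl⟩))
      have hq2 : v ∈ q.2 ↔ v ∈ vs := by rw [← hhead]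
      by_cases hv : v ∈ vs
      · rw [List.filter_cons, if_pos (by simp [hq2, hv]), List.map_cons, hq1,
          List.count_cons_self, List.count_eq_zero_of_not_mem hknot]
        simp [hv]
      · rw [List.filter_cons, if_neg (by simp [hq2, hv]),
          List.count_eq_zero_of_not_mem hknot]
        simp [hv]
    · have hk : k ∈ t.map Prod.fst := List.mem_map.mpr ⟨(k, vs), htail, rfl⟩
      have hqk : q.1 ≠ k := fun h => hq (h ▸ hk)
      rw [List.filter_cons]
      by_cases hv : v ∈ q.2
      · rw [if_pos (by simp [hv]), List.map_cons]
        simp [hqk, ih ht htail]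
      · rw [if_neg (by simp [hv]), ih ht htail]

-- Core: over any items list with distinct keys, A's loop body and B's loop body build equal entries.
theorem pv_core (l : List (Int × List Int)) (hnd : (l.map Prod.fst).Nodup) (p : Prod Int (List Int)) :
    l.foldl (fun shared_keys q =>
        if q.1 == p.1 then shared_keys
        else shared_keys ++ PySem.List.pyRepeat [q.1]
          (p.2.foldl (fun acc v => if v ∈ q.2 then acc + 1 else acc) 0)) []
    = (l.map Prod.fst).foldl (fun out k2 =>
        if k2 == p.1 then out
        else out ++ PySem.List.pyRepeat [k2]
          ((p.2.foldl (fun counts v =>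
              ((l.foldl (fun ix r => (PySem.Set.ofList r.2).foldl
                  (fun ix v' => ix.modify v' [] (· ++ [r.1])) ix) PySem.Dict.empty).getD v []).foldl
                (fun counts k2 => if k2 == p.1 then counts else counts.modify k2 0 (· + 1)) counts)
            PySem.Dict.empty).getD k2 0)) [] := by
  rw [List.foldl_map]
  apply PySem.List.foldl_congr_mem
  intro acc q hq
  by_cases hqp : q.1 = p.1
  · simp [hqp]
  · have hb : (q.1 == p.1) = false := by simp [hqp]
    simp only [hb, Bool.false_eq_true, if_false]
    congr 1
    congr 1
    -- A's count = B's tallied count at key q.1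
    rw [PySem.List.foldl_ite_add_one (p := fun v => v ∈ q.2),
        pv_cnt_all p.2
          (fun v => (l.foldl (fun ix r => (PySem.Set.ofList r.2).foldl
              (fun ix v' => ix.modify v' [] (· ++ [r.1])) ix) PySem.Dict.empty).getD v [])
          p.1 q.1 hqp, PySem.Dict.getD_empty]
    congr 1
    rw [List.map_congr_left (fun v _ => by
      rw [pv_idx_all, PySem.Dict.getD_empty, List.nil_append,
          pv_count_in_index l hnd q.1 q.2 (by simpa using hq) v])]
    rw [show (fun v => ((if v ∈ q.2 then 1 else 0 : Nat) : Int))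
          = fun v => if (fun v => decide (v ∈ q.2)) v = true then (1 : Int) else 0 by
        funext v; by_cases h : v ∈ q.2 <;> simp [h]]
    rw [PySem.List.sum_map_ite_one_zero]

-- ===== VERDICT (by name: the statement is the Claim_ definition above) =====
theorem node_connectivity_finder_spec : Claim_equal_node_connectivity_finder := by
  intro dictionary _
  unfold Spec_node_connectivity_finder node_connectivity_finder node_connectivity_finder_alt
  simp only [PySem.Dict.keys]
  have hnd : ((PySem.Dict.ofList dictionary).items.map Prod.fst).Nodup :=
    PySem.Dict.nodup_keys_ofList dictionary
  generalize (PySem.Dict.ofList dictionary).items = l at hnd ⊢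
  rw [PySem.Dict.items_foldl_insert_fresh l Prod.fst _ PySem.Dict.empty
       (fun a _ => PySem.Dict.contains_empty _) hnd,
      PySem.Dict.items_foldl_insert_fresh l Prod.fst _ PySem.Dict.empty
       (fun a _ => PySem.Dict.contains_empty _) hnd]
  show List.map _ l = List.map _ l
  apply List.map_congr_left
  intro p _
  rw [pv_core l hnd p]
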